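-- pv_equiv track=rewrite | github.com/sdubee10/Problem-Solving | 프로그래머스/Level1/Lv1. 약수의 개수와 덧셈.py | calcdivisor
-- ===== SOURCE A (Python) =====
-- def calcdivisor(n):
--     count = 0
--     for i in range(1, n):
--         if n % i == 0:
--             count += 1
--     if count % 2 == 0:
--         return True
--     else:
--         return False
-- ===== SOURCE B (Python) =====
-- def calcdivisor(n):
--     # n has an even number of proper divisors (divisors in [1, n)) iff its total
--     # divisor count is odd, i.e. iff n is a perfect square; n < 1 has no divisors in range.
--     if n < 1:
--         return True
--     i = 1
--     while i * i < n:
--         i += 1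
--     return i * i == n
-- ===== Notes on version B (the rewrite author's own statement) =====
-- stated objective: faster
-- what changed: Replaces the O(n) scan of all candidate divisors (parity of the proper-divisor count) with an O(sqrt n) search for the integer square root, since the proper-divisor count is even exactly when n is a perfect square (or n < 1).
import Mathlib
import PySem

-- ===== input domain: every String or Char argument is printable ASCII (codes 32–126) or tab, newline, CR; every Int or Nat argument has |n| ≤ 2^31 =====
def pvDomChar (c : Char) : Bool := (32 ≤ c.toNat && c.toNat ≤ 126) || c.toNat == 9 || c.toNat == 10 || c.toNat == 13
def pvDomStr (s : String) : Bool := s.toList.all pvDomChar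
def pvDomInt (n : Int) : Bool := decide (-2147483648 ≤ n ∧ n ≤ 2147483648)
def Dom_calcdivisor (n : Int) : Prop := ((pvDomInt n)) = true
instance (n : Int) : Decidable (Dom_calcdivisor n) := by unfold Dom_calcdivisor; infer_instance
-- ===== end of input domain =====

-- B replaces A's O(n) scan over all candidate divisors by an O(sqrt n) integer-square-root
-- search: the count of divisors of n in [1, n) is even exactly when n is a perfect square (or n < 1).

-- ===== PORT A =====
def calcdivisor (n : Int) : Bool :=
  let count : Int :=
    (PySem.List.pyRange 1 n).foldl (fun c i => if PySem.Int.mod n i = 0 then c + 1 else c) 0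
  if PySem.Int.mod count 2 = 0 then true else false

-- ===== PORT B =====
-- while i * i < n: i += 1   (terminates: n - i shrinks; i*i < n forces i < n)
def pvSqrtLoop (n i : Int) : Int :=
  if i * i < n then pvSqrtLoop n (i + 1) else i
termination_by (n - i).toNat
decreasing_by
  have h2 : i < n := by nlinarith [mul_self_nonneg (i - 1), mul_self_nonneg i]
  omega

def calcdivisor_alt (n : Int) : Bool :=
  if n < 1 then true
  else decide (pvSqrtLoop n 1 * pvSqrtLoop n 1 = n)

-- ===== PRECONDITION & SPEC =====
def Spec_calcdivisor (n : Int) (out : Bool) : Prop := out = calcdivisor_alt n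
instance (n : Int) (out : Bool) : Decidable (Spec_calcdivisor n out) := by unfold Spec_calcdivisor; infer_instance

-- ===== CLAIM (what is proved, stated in full; the proofs are below) =====
def Claim_equal_calcdivisor : Prop := ∀ (n : Int), Dom_calcdivisor n → Spec_calcdivisor n (calcdivisor n)

-- ===== LEMMAS AND PROOFS =====

-- list countP over range as a Finset card
lemma pv_countP_range_card (N : ℕ) (p : ℕ → Bool) :
    (List.range N).countP p = ((Finset.range N).filter (fun k => p k)).card := by
  simp only [Finset.card, Finset.filter_val, Finset.range_val, Multiset.range,
    Multiset.filter_coe, Multiset.coe_card, List.countP_eq_length_filter]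
  congr 1
  apply List.filter_congr
  intro x _
  simp

-- the shifted filter over range (m-1) is exactly the proper-divisor set
lemma pv_filter_card (m : ℕ) (hm : 1 ≤ m) :
    ((Finset.range (m - 1)).filter (fun k => (1 + k) ∣ m)).card
      = m.properDivisors.card := by
  apply Finset.card_bij' (i := fun k _ => 1 + k) (j := fun d _ => d - 1)
  case hi =>
    intro k hk
    simp only [Finset.mem_filter, Finset.mem_range] at hk
    rw [Nat.mem_properDivisors]
    exact ⟨hk.2, by omega⟩
  case hj =>
    intro d hd
    rw [Nat.mem_properDivisors] at hd
    have hd0 : d ≠ 0 := by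
      rintro rfl
      exact absurd (Nat.eq_zero_of_zero_dvd hd.1) (by omega)
    simp only [Finset.mem_filter, Finset.mem_range]
    constructor
    · omega
    · have h1d : 1 + (d - 1) = d := by omega
      rw [h1d]
      exact hd.1
  case left_inv =>
    intro k _
    omega
  case right_inv =>
    intro d hd
    rw [Nat.mem_properDivisors] at hd
    have hd0 : d ≠ 0 := by
      rintro rfl
      exact absurd (Nat.eq_zero_of_zero_dvd hd.1) (by omega)
    omega

-- A's loop counts the proper divisors of n
lemma pv_A_count (n : Int) (hn : 1 ≤ n) :
    (PySem.List.pyRange 1 n).foldl (fun c i => if PySem.Int.mod n i = 0 then c + 1 else c) 0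
      = ((n.toNat.properDivisors).card : Int) := by
  rw [PySem.List.foldl_ite_add_one (fun i => PySem.Int.mod n i = 0), PySem.List.pyRange_one,
    List.countP_map, zero_add]
  congr 1
  have hcast : ((n.toNat : Int)) = n := Int.toNat_of_nonneg (by omega)
  have hstep : List.countP ((fun x => decide (PySem.Int.mod n x = 0)) ∘ fun k : ℕ => 1 + (k : Int))
      (List.range (n - 1).toNat)
      = List.countP (fun k => decide ((1 + k) ∣ n.toNat)) (List.range (n - 1).toNat) := by
    apply List.countP_congr
    intro k _
    simp only [Function.comp_apply, decide_eq_true_eq, PySem.Int.mod_eq_zero_iff_dvd]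
    rw [← hcast]
    constructor
    · intro h
      exact_mod_cast h
    · intro h
      exact_mod_cast h
  rw [hstep, pv_countP_range_card]
  have hlen : (n - 1).toNat = n.toNat - 1 := by omega
  rw [hlen]
  rw [show ((Finset.range (n.toNat - 1)).filter fun k => decide ((1 + k) ∣ n.toNat))
        = ((Finset.range (n.toNat - 1)).filter fun k => (1 + k) ∣ n.toNat) from by simp]
  exact pv_filter_card n.toNat (by omega)

-- d(m) is odd iff m is a perfect square (pair d with m/d; only the square root is fixed)
lemma pv_odd_divisors_iff_sq (m : ℕ) (hm : m ≠ 0) :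
    Odd m.divisors.card ↔ ∃ r : ℕ, r * r = m := by
  classical
  have hmem : ∀ d ∈ m.divisors, d ∣ m ∧ 0 < d := by
    intro d hd
    rw [Nat.mem_divisors] at hd
    refine ⟨hd.1, ?_⟩
    rcases Nat.eq_zero_or_pos d with rfl | h
    · exact absurd (Nat.eq_zero_of_zero_dvd hd.1) hm
    · exact h
  have hsplit1 : (m.divisors.filter (fun d => d * d < m)).card
      + (m.divisors.filter (fun d => ¬ d * d < m)).card = m.divisors.card :=
    Finset.card_filter_add_card_filter_not _
  have hunion : (m.divisors.filter (fun d => ¬ d * d < m))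
      = (m.divisors.filter (fun d => d * d = m)) ∪ (m.divisors.filter (fun d => m < d * d)) := by
    ext d
    simp only [Finset.mem_filter, Finset.mem_union]
    constructor
    · intro ⟨h1, h2⟩
      rcases Nat.lt_or_ge m (d * d) with h | h
      · exact Or.inr ⟨h1, h⟩
      · exact Or.inl ⟨h1, by omega⟩
    · rintro (⟨h1, h2⟩ | ⟨h1, h2⟩) <;> exact ⟨h1, by omega⟩
  have hdisj : Disjoint (m.divisors.filter (fun d => d * d = m))
      (m.divisors.filter (fun d => m < d * d)) := by
    rw [Finset.disjoint_left]
    intro d h1 h2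
    simp only [Finset.mem_filter] at h1 h2
    omega
  have hGT : (m.divisors.filter (fun d => m < d * d)).card
      = (m.divisors.filter (fun d => d * d < m)).card := by
    apply Finset.card_bij' (i := fun d _ => m / d) (j := fun d _ => m / d)
    case hi =>
      intro d hd
      rw [Finset.mem_filter] at hd
      obtain ⟨hdm, hlt⟩ := hd
      obtain ⟨⟨e, he⟩, hd0⟩ := hmem d hdm
      have he0 : 0 < e := by
        rcases Nat.eq_zero_or_pos e with rfl | h
        · exact absurd (by omega : m = 0) hm
        · exact h
      have hdiv : m / d = e := by rw [he, Nat.mul_div_cancel_left e hd0]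
      have hed : e < d := by nlinarith
      rw [Finset.mem_filter, hdiv]
      refine ⟨Nat.mem_divisors.mpr ⟨⟨d, by rw [he, Nat.mul_comm]⟩, hm⟩, by nlinarith⟩
    case hj =>
      intro d hd
      rw [Finset.mem_filter] at hd
      obtain ⟨hdm, hlt⟩ := hd
      obtain ⟨⟨e, he⟩, hd0⟩ := hmem d hdm
      have he0 : 0 < e := by
        rcases Nat.eq_zero_or_pos e with rfl | h
        · exact absurd (by omega : m = 0) hm
        · exact h
      have hdiv : m / d = e := by rw [he, Nat.mul_div_cancel_left e hd0]
      have hed : d < e := by nlinarith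
      rw [Finset.mem_filter, hdiv]
      refine ⟨Nat.mem_divisors.mpr ⟨⟨d, by rw [he, Nat.mul_comm]⟩, hm⟩, by nlinarith⟩
    case left_inv =>
      intro d hd
      rw [Finset.mem_filter] at hd
      exact Nat.div_div_self (hmem d hd.1).1 hm
    case right_inv =>
      intro d hd
      rw [Finset.mem_filter] at hd
      exact Nat.div_div_self (hmem d hd.1).1 hm
  by_cases hsq : ∃ r : ℕ, r * r = m
  · obtain ⟨r, hr⟩ := hsq
    have hEQ : (m.divisors.filter (fun d => d * d = m)) = {r} := by
      ext d
      simp only [Finset.mem_filter, Finset.mem_singleton, Nat.mem_divisors]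
      constructor
      · intro ⟨_, hdd⟩
        exact Nat.mul_self_inj.mp (by rw [hdd, hr])
      · intro hdr
        rw [hdr]
        exact ⟨⟨⟨r, hr.symm⟩, hm⟩, hr⟩
    have hodd : m.divisors.card = 2 * (m.divisors.filter (fun d => d * d < m)).card + 1 := by
      rw [← hsplit1, hunion, Finset.card_union_of_disjoint hdisj, hEQ, hGT,
        Finset.card_singleton]
      omega
    rw [hodd]
    exact iff_of_true ⟨_, rfl⟩ ⟨r, hr⟩
  · have hEQ : (m.divisors.filter (fun d => d * d = m)) = ∅ := by
      rw [Finset.filter_eq_empty_iff]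
      intro d _ hdd
      exact hsq ⟨d, hdd⟩
    have heven : m.divisors.card = 2 * (m.divisors.filter (fun d => d * d < m)).card := by
      rw [← hsplit1, hunion, Finset.card_union_of_disjoint hdisj, hEQ, hGT,
        Finset.card_empty]
      omega
    rw [heven]
    exact iff_of_false (by simp [Nat.odd_iff, Nat.mul_mod_right]) hsq

lemma pv_sqrtLoop_ge (n i : Int) : n ≤ pvSqrtLoop n i * pvSqrtLoop n i := by
  fun_induction pvSqrtLoop n i with
  | case1 i h ih => exact ih
  | case2 i h => omega

lemma pv_sqrtLoop_le (n i : Int) : i ≤ pvSqrtLoop n i := by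
  fun_induction pvSqrtLoop n i with
  | case1 i h ih => omega
  | case2 i h => omega

lemma pv_sqrtLoop_below (n i : Int) : ∀ k : Int, i ≤ k → k < pvSqrtLoop n i → k * k < n := by
  fun_induction pvSqrtLoop n i with
  | case1 i h ih =>
    intro k hik hk
    rcases eq_or_lt_of_le hik with rfl | hlt
    · exact h
    · exact ih k (by omega) hk
  | case2 i h =>
    intro k hik hk
    omega

-- B's test is "n is a perfect square" (for 1 ≤ n)
lemma pv_B_iff_sq (n : Int) (hn : 1 ≤ n) :
    (pvSqrtLoop n 1 * pvSqrtLoop n 1 = n) ↔ ∃ r : ℕ, r * r = n.toNat := by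
  have hj1 : 1 ≤ pvSqrtLoop n 1 := pv_sqrtLoop_le n 1
  have hjge : n ≤ pvSqrtLoop n 1 * pvSqrtLoop n 1 := pv_sqrtLoop_ge n 1
  have hn' : ((n.toNat : Int)) = n := Int.toNat_of_nonneg (by omega)
  constructor
  · intro h
    refine ⟨(pvSqrtLoop n 1).toNat, ?_⟩
    have hjc : (((pvSqrtLoop n 1).toNat : Int)) = pvSqrtLoop n 1 := Int.toNat_of_nonneg (by omega)
    have : (((pvSqrtLoop n 1).toNat * (pvSqrtLoop n 1).toNat : ℕ) : Int) = ((n.toNat : Int)) := by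
      push_cast
      rw [hjc, h, hn']
    exact_mod_cast this
  · intro ⟨r, hr⟩
    have hrInt : (r : Int) * (r : Int) = n := by
      rw [← Nat.cast_mul, hr, hn']
    have hr1 : 1 ≤ (r : Int) := by
      rcases Nat.eq_zero_or_pos r with rfl | h
      · simp at hrInt; omega
      · exact_mod_cast h
    have hjr : pvSqrtLoop n 1 ≤ (r : Int) := by
      by_contra hcon
      rw [Int.not_le] at hcon
      have := pv_sqrtLoop_below n 1 (r : Int) hr1 hcon
      omega
    have : pvSqrtLoop n 1 * pvSqrtLoop n 1 ≤ (r : Int) * (r : Int) :=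
      mul_le_mul hjr hjr (by omega) (by omega)
    omega

-- ===== VERDICT (by name: the statement is the Claim_ definition above) =====
theorem calcdivisor_spec : Claim_equal_calcdivisor := by
  intro n _
  unfold Spec_calcdivisor calcdivisor calcdivisor_alt
  by_cases hn : n < 1
  · rw [PySem.List.pyRange_one_eq_nil (by omega)]
    simp [hn]
  · rw [Int.not_lt] at hn
    rw [pv_A_count n hn]
    have hm : n.toNat ≠ 0 := by omega
    have hcard : n.toNat.divisors.card = n.toNat.properDivisors.card + 1 := by
      rw [← Nat.cons_self_properDivisors hm, Finset.card_cons]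
    have hA : PySem.Int.mod ((n.toNat.properDivisors.card : Int)) 2 = 0
        ↔ Odd n.toNat.divisors.card := by
      rw [PySem.Int.mod_eq_zero_iff_dvd]
      rw [show ((2:Int)) = (((2:ℕ) : Int)) from rfl, Int.natCast_dvd_natCast]
      rw [hcard, Nat.odd_iff]
      omega
    rw [pv_odd_divisors_iff_sq n.toNat hm] at hA
    rw [← pv_B_iff_sq n hn] at hA
    by_cases hP : PySem.Int.mod ((n.toNat.properDivisors.card : Int)) 2 = 0
    · simp only [if_pos hP, if_neg (show ¬ n < 1 by omega)]
      exact (decide_eq_true (hA.mp hP)).symm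
    · have hQ : ¬ (pvSqrtLoop n 1 * pvSqrtLoop n 1 = n) := fun h => hP (hA.mpr h)
      simp only [if_neg hP, if_neg (show ¬ n < 1 by omega)]
      exact (decide_eq_false hQ).symm
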